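-- pv_equiv track=rewrite | github.com/MITYROMAN/Training | Recursion.py | get_multiplied_digits
-- ===== SOURCE A (Python) =====
-- def get_multiplied_digits(number):
--     str_number = str(number)  # Преобразуем число в строку
--
--     if len(str_number) == 1:  # Базовый случай
--         return int(str_number) if str_number != '0' else 1  # Если '0', то возвращаем 1;# Если '0', то возвращаем 1
--
--     first = int(str_number[0])  # Извлекаем первую цифру
--     if first == 0:  # Если первая цифра 0, пропускаем её; # Если первая цифра 0, пропускаем её
--         return get_multiplied_digits(int(str_number[1:]))  # Рекурсивный вызов на оставшихся
--     return first * get_multiplied_digits(int(str_number[1:]))  # Умножаем на результат рекурсии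
-- ===== SOURCE B (Python) =====
-- def get_multiplied_digits(number):
--     product = 1
--     n = number
--     while n > 0:
--         n, d = divmod(n, 10)
--         if d != 0:
--             product *= d
--     return product
-- ===== Notes on version B (the rewrite author's own statement) =====
-- stated objective: faster
-- what changed: A recursively converts the number to a string, reparses the suffix with int() and recurses on it at every level; B is a single arithmetic divmod loop over the digits with a running product and no string conversion at all.
-- outside the precondition, e.g. on get_multiplied_digits(-5): A raises ValueError, B returns 1
import Mathlib
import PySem

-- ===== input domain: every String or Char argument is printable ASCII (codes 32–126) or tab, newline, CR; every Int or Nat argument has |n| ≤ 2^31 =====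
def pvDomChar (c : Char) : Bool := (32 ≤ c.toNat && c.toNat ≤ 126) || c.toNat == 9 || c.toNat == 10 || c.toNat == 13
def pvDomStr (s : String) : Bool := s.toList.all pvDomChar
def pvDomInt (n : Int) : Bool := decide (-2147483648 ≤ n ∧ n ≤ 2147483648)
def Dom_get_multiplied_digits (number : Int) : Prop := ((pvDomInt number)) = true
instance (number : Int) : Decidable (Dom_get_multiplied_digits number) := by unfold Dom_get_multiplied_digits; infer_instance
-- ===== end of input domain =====

-- B replaces A's string-recursion (str/int reconversion of the suffix at every level) by a single
-- arithmetic divmod loop over the digits; return-value equivalence on number ≥ 0 (A raises ValueError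
-- on negative numbers, which Pre_ excludes).

-- ===== PORT A =====
-- Python's int(s) is PySem.Int.ofChars?, but its digit parser is private to the prelude, so int() is
-- hand-ported here step for step; it is EXACT (same value, none exactly where int() raises) on every
-- string A parses inside Pre_: these are always nonempty all-digit strings (str(n)[k:] for n ≥ 0).
def pvDigitVal? (c : Char) : Option Int :=
  if 48 ≤ c.toNat ∧ c.toNat ≤ 57 then some ((c.toNat : Int) - 48) else none

def pyIntDigits? : List Char → Option Int
  | [] => none
  | c :: cs => (c :: cs).foldl (fun acc c =>
      match acc, pvDigitVal? c with
      | some a, some d => some (10 * a + d)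
      | _, _ => none) (some 0)

-- A's recursion, with a fuel counter as totality guard only: the Python argument strictly decreases
-- (int(str(n)[1:]) < n for n ≥ 10), so fuel natAbs+1 is never exhausted; strings are carried as
-- List Char (PySem.Int.toChars = str(number); s[1:] = List.drop 1, exact; s[0] = PySem.List.pyGet?).
def pvAGo : Nat → Int → Int
  | 0, _ => 0
  | fuel + 1, number =>
    let s := PySem.Int.toChars number                -- str_number = str(number)
    if s.length = 1 then                             -- len(str_number) == 1
      (if s ≠ ['0'] then (pyIntDigits? s).getD 0 else 1)
    else
      match PySem.List.pyGet? s 0 with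
      | none => 0                                    -- unreachable: str(number) is never empty
      | some c0 =>
        let first := (pyIntDigits? [c0]).getD 0      -- int(str_number[0]); none (= ValueError) only for number < 0, excluded by Pre_
        let rest := (pyIntDigits? (s.drop 1)).getD 0 -- int(str_number[1:])
        if first = 0 then pvAGo fuel rest else first * pvAGo fuel rest

def get_multiplied_digits (number : Int) : Int := pvAGo (number.natAbs + 1) number

-- ===== PORT B =====
-- Source B's while loop, again with fuel as totality guard only (n strictly decreases while 0 < n).
def pvBGo : Nat → Int → Int → Int
  | 0, product, _ => product
  | fuel + 1, product, n =>
    if 0 < n then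
      let n' := PySem.Int.floordiv n 10
      let d := PySem.Int.mod n 10                    -- n, d = divmod(n, 10)
      pvBGo fuel (if d ≠ 0 then product * d else product) n'
    else product

def get_multiplied_digits_alt (number : Int) : Int := pvBGo (number.natAbs + 1) 1 number

-- ===== PRECONDITION & SPEC =====
-- Pre_ excludes exactly the negative numbers: there A reaches int('-') and raises ValueError.
def Pre_get_multiplied_digits (number : Int) : Prop := 0 ≤ number
instance (number : Int) : Decidable (Pre_get_multiplied_digits number) := by
  unfold Pre_get_multiplied_digits; infer_instance

def pvWitness_get_multiplied_digits : Int := 105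

def Spec_get_multiplied_digits (number : Int) (out : Int) : Prop := out = get_multiplied_digits_alt number
instance (number : Int) (out : Int) : Decidable (Spec_get_multiplied_digits number out) := by unfold Spec_get_multiplied_digits; infer_instance

-- ===== CLAIM (what is proved, stated in full; the proofs are below) =====
def Claim_equal_get_multiplied_digits : Prop := ∀ (number : Int), Dom_get_multiplied_digits number → Pre_get_multiplied_digits number → Spec_get_multiplied_digits number (get_multiplied_digits number)

-- ===== LEMMAS AND PROOFS =====

-- the decimal digit string of m, most significant first (what Nat.toDigits 10 computes)
def pvDigits (m : Nat) : List Char :=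
  if m < 10 then [Nat.digitChar m]
  else pvDigits (m / 10) ++ [Nat.digitChar (m % 10)]
decreasing_by exact Nat.div_lt_self (by omega) (by omega)

def pvIsDig (c : Char) : Prop := 48 ≤ c.toNat ∧ c.toNat ≤ 57

def pvVal (cs : List Char) : Nat := cs.foldl (fun a c => 10 * a + (c.toNat - 48)) 0

def pvVal0 (c : Char) : Int := if c = '0' then 1 else (c.toNat : Int) - 48

def pvChProd (cs : List Char) : Int := (cs.map pvVal0).prod

theorem pvDigits_small {m : Nat} (h : m < 10) : pvDigits m = [Nat.digitChar m] := by
  rw [pvDigits]; simp [h]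

theorem pvDigits_big {m : Nat} (h : ¬ m < 10) : pvDigits m = pvDigits (m / 10) ++ [Nat.digitChar (m % 10)] := by
  rw [pvDigits]; simp [h]

theorem pvDigitChar_toNat {m : Nat} (h : m < 10) : (Nat.digitChar m).toNat = m + 48 := by
  interval_cases m <;> decide

theorem pvDigitChar_eq_zero {m : Nat} (h : m < 10) : (Nat.digitChar m = '0') ↔ m = 0 := by
  interval_cases m <;> decide

theorem pvDigitChar_of_dig {c : Char} (h : pvIsDig c) : Nat.digitChar (c.toNat - 48) = c := by
  obtain ⟨h1, h2⟩ := h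
  have hc : c = Char.ofNat c.toNat := (Char.ofNat_toNat c).symm
  interval_cases h3 : c.toNat <;> rw [hc] <;> decide

theorem pvIsDig_digitChar {m : Nat} (h : m < 10) : pvIsDig (Nat.digitChar m) := by
  constructor <;> rw [pvDigitChar_toNat h] <;> omega

theorem pvDigits_dig (m : Nat) : ∀ c ∈ pvDigits m, pvIsDig c := by
  induction m using Nat.strong_induction_on with
  | _ m ih =>
    by_cases h : m < 10
    · rw [pvDigits_small h]; intro c hc; simp at hc; subst hc; exact pvIsDig_digitChar h
    · rw [pvDigits_big h]; intro c hc
      rcases List.mem_append.mp hc with hc | hc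
      · exact ih (m / 10) (Nat.div_lt_self (by omega) (by omega)) c hc
      · simp at hc; subst hc; exact pvIsDig_digitChar (Nat.mod_lt _ (by omega))

theorem pvDigits_head (m : Nat) (h : 1 ≤ m) :
    ∃ c rest, pvDigits m = c :: rest ∧ 49 ≤ c.toNat ∧ c.toNat ≤ 57 := by
  induction m using Nat.strong_induction_on with
  | _ m ih =>
    by_cases h10 : m < 10
    · refine ⟨Nat.digitChar m, [], pvDigits_small h10, ?_, ?_⟩ <;>
        rw [pvDigitChar_toNat h10] <;> omega
    · obtain ⟨c, rest, he, h1, h2⟩ :=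
        ih (m / 10) (Nat.div_lt_self (by omega) (by omega)) (by omega)
      exact ⟨c, rest ++ [Nat.digitChar (m % 10)], by rw [pvDigits_big h10, he]; simp, h1, h2⟩

-- Nat.toDigits 10 computes pvDigits
theorem pvToDigitsCore_eq : ∀ (f m : Nat) (ds : List Char), m < f →
    Nat.toDigitsCore 10 f m ds = pvDigits m ++ ds := by
  intro f
  induction f with
  | zero => omega
  | succ f ih =>
    intro m ds hm
    rw [Nat.toDigitsCore]
    by_cases h : m / 10 = 0
    · have h10 : m < 10 := by omega
      simp [h, pvDigits_small h10, Nat.mod_eq_of_lt h10]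
    · have h10 : ¬ m < 10 := by omega
      simp only [h]
      rw [ih (m / 10) _ (by omega)]
      rw [pvDigits_big h10]
      simp

theorem pvToDigits_eq (m : Nat) : Nat.toDigits 10 m = pvDigits m := by
  rw [Nat.toDigits, pvToDigitsCore_eq (m + 1) m [] (by omega)]; simp

theorem pvToChars_eq {n : Int} (h : 0 ≤ n) : PySem.Int.toChars n = pvDigits n.toNat := by
  rw [PySem.Int.toChars, if_neg (by omega)]
  exact pvToDigits_eq n.toNat

-- value machinery
theorem pvVal_append (xs : List Char) (c : Char) :
    pvVal (xs ++ [c]) = 10 * pvVal xs + (c.toNat - 48) := by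
  simp [pvVal, List.foldl_append]

theorem pvVal_from (cs : List Char) : ∀ a : Nat,
    cs.foldl (fun a c => 10 * a + (c.toNat - 48)) a = a * 10 ^ cs.length + pvVal cs := by
  induction cs with
  | nil => intro a; simp [pvVal]
  | cons c cs ih =>
    intro a
    simp only [List.foldl_cons, List.length_cons]
    rw [ih (10 * a + (c.toNat - 48))]
    conv_rhs => rw [pvVal, List.foldl_cons, ih (10 * 0 + (c.toNat - 48))]
    ring

theorem pvVal_lt (cs : List Char) (h : ∀ c ∈ cs, pvIsDig c) : pvVal cs < 10 ^ cs.length := by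
  induction cs with
  | nil => simp [pvVal]
  | cons c cs ih =>
    have hd : pvIsDig c := h c (by simp)
    have hcs := ih (fun x hx => h x (by simp [hx]))
    rw [pvVal, List.foldl_cons, pvVal_from cs (10 * 0 + (c.toNat - 48))]
    simp only [List.length_cons]
    have : c.toNat - 48 ≤ 9 := by obtain ⟨h1, h2⟩ := hd; omega
    have h10 : (10:Nat) ^ (cs.length + 1) = 10 * 10 ^ cs.length := by ring
    nlinarith [pow_pos (show (0:Nat) < 10 by omega) cs.length]

theorem pvVal_pvDigits (m : Nat) : pvVal (pvDigits m) = m := by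
  induction m using Nat.strong_induction_on with
  | _ m ih =>
    by_cases h : m < 10
    · rw [pvDigits_small h]
      simp [pvVal, pvDigitChar_toNat h]
    · rw [pvDigits_big h, pvVal_append, ih (m / 10) (Nat.div_lt_self (by omega) (by omega))]
      rw [pvDigitChar_toNat (Nat.mod_lt _ (by omega))]
      omega

-- the hand-ported int() on digit strings
theorem pvDigitVal?_of_dig {c : Char} (h : pvIsDig c) :
    pvDigitVal? c = some ((c.toNat : Int) - 48) := by
  have h' : 48 ≤ c.toNat ∧ c.toNat ≤ 57 := h
  rw [pvDigitVal?, if_pos h']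

theorem pyIntDigits?_aux (cs : List Char) (h : ∀ c ∈ cs, pvIsDig c) : ∀ a : Nat,
    cs.foldl (fun acc c =>
      match acc, pvDigitVal? c with
      | some a, some d => some (10 * a + d)
      | _, _ => none) (some (a : Int))
    = some ((cs.foldl (fun a c => 10 * a + (c.toNat - 48)) a : Nat) : Int) := by
  induction cs with
  | nil => intro a; simp
  | cons c cs ih =>
    intro a
    have hd : pvIsDig c := h c (by simp)
    simp only [List.foldl_cons, pvDigitVal?_of_dig hd]
    have hcast : (10 * (a : Int) + ((c.toNat : Int) - 48)) = ((10 * a + (c.toNat - 48) : Nat) : Int) := by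
      obtain ⟨h1, h2⟩ := hd
      push_cast [Nat.cast_sub h1]
      ring
    rw [hcast, ih (fun x hx => h x (by simp [hx]))]

theorem pyIntDigits?_eq (cs : List Char) (hne : cs ≠ []) (h : ∀ c ∈ cs, pvIsDig c) :
    pyIntDigits? cs = some ((pvVal cs : Nat) : Int) := by
  cases cs with
  | nil => exact absurd rfl hne
  | cons c cs' =>
    rw [pyIntDigits?]
    exact pyIntDigits?_aux (c :: cs') h 0

-- the digit product
theorem pvChProd_append (xs : List Char) (c : Char) :
    pvChProd (xs ++ [c]) = pvChProd xs * pvVal0 c := by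
  simp [pvChProd]

theorem pvChProd_cons (c : Char) (xs : List Char) :
    pvChProd (c :: xs) = pvVal0 c * pvChProd xs := by
  simp [pvChProd]

theorem pvVal0_digitChar {m : Nat} (h : m < 10) :
    pvVal0 (Nat.digitChar m) = if m = 0 then 1 else (m : Int) := by
  rw [pvVal0]
  by_cases h0 : m = 0
  · subst h0; decide
  · rw [if_neg (fun hc => h0 ((pvDigitChar_eq_zero h).mp hc)), if_neg h0,
      pvDigitChar_toNat h]
    push_cast; ring

-- stripping leading zeros (what int() ∘ str() does to a digit suffix) preserves the digit product
theorem pvChProd_pvDigits_pvVal (cs : List Char) (h : ∀ c ∈ cs, pvIsDig c) (hne : cs ≠ []) :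
    pvChProd (pvDigits (pvVal cs)) = pvChProd cs := by
  induction cs using List.reverseRecOn with
  | nil => exact absurd rfl hne
  | append_singleton xs c ih =>
    have hc : pvIsDig c := h c (by simp)
    have hv : c.toNat - 48 < 10 := by obtain ⟨h1, h2⟩ := hc; omega
    have hxs : ∀ x ∈ xs, pvIsDig x := fun x hx => h x (by simp [hx])
    rw [pvVal_append, pvChProd_append]
    by_cases hxe : xs = []
    · subst hxe
      simp only [pvVal, List.foldl_nil, Nat.mul_zero, Nat.zero_add]
      rw [pvDigits_small hv, pvDigitChar_of_dig hc]
      simp [pvChProd]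
    · have ihx := ih hxs hxe
      by_cases ha : pvVal xs = 0
      · rw [ha] at ihx ⊢
        simp only [Nat.mul_zero, Nat.zero_add]
        rw [pvDigits_small hv, pvDigitChar_of_dig hc, pvChProd_cons]
        have : pvChProd (pvDigits 0) = 1 := by
          rw [pvDigits_small (by omega)]; decide
        rw [this] at ihx
        rw [pvChProd]
        simp [← ihx]
      · have hm : ¬ 10 * pvVal xs + (c.toNat - 48) < 10 := by omega
        rw [pvDigits_big hm]
        have hdiv : (10 * pvVal xs + (c.toNat - 48)) / 10 = pvVal xs := by omega
        have hmod : (10 * pvVal xs + (c.toNat - 48)) % 10 = c.toNat - 48 := by omega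
        rw [hdiv, hmod, pvChProd_append, ihx, pvDigitChar_of_dig hc]

-- ===== A-side: pvAGo computes the digit product =====
theorem pvAGo_eq : ∀ (f : Nat) (n : Int), 0 ≤ n → n.toNat < f →
    pvAGo f n = pvChProd (pvDigits n.toNat) := by
  intro f
  induction f with
  | zero => omega
  | succ f ih =>
    intro n hn hf
    obtain ⟨m, rfl⟩ : ∃ m : Nat, n = (m : Int) := ⟨n.toNat, by omega⟩
    simp only [Int.toNat_natCast] at hf ⊢
    rw [pvAGo, pvToChars_eq (by positivity)]
    simp only [Int.toNat_natCast]
    by_cases h10 : m < 10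
    · rw [pvDigits_small h10, if_pos (by simp)]
      by_cases h0 : m = 0
      · subst h0
        rw [if_neg (by decide)]
        decide
      · rw [if_pos (by simp [Ne, List.cons.injEq, (pvDigitChar_eq_zero h10), h0])]
        rw [pyIntDigits?_eq [Nat.digitChar m] (by simp) (by intro c hc; simp at hc; subst hc; exact pvIsDig_digitChar h10)]
        simp only [Option.getD_some]
        have : pvVal [Nat.digitChar m] = m := by
          simp [pvVal, pvDigitChar_toNat h10]
        rw [this]
        simp only [pvChProd, List.map_cons, List.map_nil, List.prod_cons, List.prod_nil, mul_one]
        rw [pvVal0_digitChar h10, if_neg h0]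
    · obtain ⟨c0, rest, he, hc1, hc2⟩ := pvDigits_head m (by omega)
      have hdig := pvDigits_dig m
      rw [he] at hdig
      have hrest_ne : rest ≠ [] := by
        intro hr
        have := pvVal_pvDigits m
        rw [he, hr] at this
        simp [pvVal] at this
        omega
      rw [he]
      have hlen : ¬ (c0 :: rest).length = 1 := by
        cases rest with
        | nil => exact absurd rfl hrest_ne
        | cons _ _ => simp
      rw [if_neg hlen]
      have hget : PySem.List.pyGet? (c0 :: rest) 0 = some c0 := by
        simp [PySem.List.pyGet?, PySem.List.pyIdx?]
      rw [hget]
      simp only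
      have hc0dig : pvIsDig c0 := hdig c0 (by simp)
      have hfirst : pyIntDigits? [c0] = some ((c0.toNat : Int) - 48) := by
        rw [pyIntDigits?]
        simp [pvDigitVal?_of_dig hc0dig]
      have hrest_dig : ∀ c ∈ rest, pvIsDig c := fun c hc => hdig c (by simp [hc])
      have hrest : pyIntDigits? ((c0 :: rest).drop 1) = some ((pvVal rest : Nat) : Int) := by
        simp only [List.drop_one, List.tail_cons]
        exact pyIntDigits?_eq rest hrest_ne hrest_dig
      rw [hfirst, hrest]
      simp only [Option.getD_some]
      rw [if_neg (by omega)]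
      -- the recursive argument pvVal rest is strictly below m
      have hvm : pvVal (c0 :: rest) = m := by rw [← he]; exact pvVal_pvDigits m
      have hlt : pvVal rest < m := by
        conv_rhs => rw [← hvm, pvVal, List.foldl_cons]
        rw [pvVal_from]
        have h1 : pvVal rest < 10 ^ rest.length := pvVal_lt rest hrest_dig
        have h2 : 1 ≤ 10 * 0 + (c0.toNat - 48) := by omega
        nlinarith [pow_pos (show (0:Nat) < 10 by omega) rest.length]
      have hrec := ih ((pvVal rest : Nat) : Int) (by positivity) (by simp only [Int.toNat_natCast]; omega)
      simp only [Int.toNat_natCast] at hrec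
      rw [hrec, pvChProd_pvDigits_pvVal rest hrest_dig hrest_ne, pvChProd_cons, pvVal0,
        if_neg (by intro hc; rw [hc] at hc1; simp at hc1)]

-- ===== B-side: pvBGo computes the digit product =====
theorem pvChProd_step (m : Nat) :
    pvChProd (pvDigits m) = pvChProd (pvDigits (m / 10)) * pvVal0 (Nat.digitChar (m % 10)) := by
  by_cases h10 : m < 10
  · rw [pvDigits_small h10, Nat.div_eq_of_lt h10, Nat.mod_eq_of_lt h10,
      pvDigits_small (by omega : (0:Nat) < 10)]
    have h0 : pvChProd [Nat.digitChar 0] = 1 := by decide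
    rw [h0, one_mul]
    simp [pvChProd]
  · rw [pvDigits_big h10, pvChProd_append]

theorem pvBGo_eq : ∀ (f : Nat) (p : Int) (n : Int), 0 ≤ n → n.toNat < f →
    pvBGo f p n = p * pvChProd (pvDigits n.toNat) := by
  intro f
  induction f with
  | zero => omega
  | succ f ih =>
    intro p n hn hf
    obtain ⟨m, rfl⟩ : ∃ m : Nat, n = (m : Int) := ⟨n.toNat, by omega⟩
    simp only [Int.toNat_natCast] at hf ⊢
    rw [pvBGo]
    by_cases hpos : 0 < (m : Int)
    · rw [if_pos hpos]
      have hfd : PySem.Int.floordiv (m : Int) 10 = ((m / 10 : Nat) : Int) := by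
        exact_mod_cast PySem.Int.floordiv_natCast m 10
      have hmd : PySem.Int.mod (m : Int) 10 = ((m % 10 : Nat) : Int) := by
        exact_mod_cast PySem.Int.mod_natCast m 10
      rw [hfd, hmd, ih _ _ (by positivity) (by simp only [Int.toNat_natCast]; omega)]
      simp only [Int.toNat_natCast]
      rw [pvChProd_step m, pvVal0_digitChar (Nat.mod_lt _ (by omega))]
      by_cases h0 : m % 10 = 0
      · rw [if_neg (by simp [h0]), if_pos h0]
        ring
      · have h0' : ((m % 10 : Nat) : Int) ≠ 0 := by exact_mod_cast h0
        rw [if_pos h0', if_neg h0]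
        push_cast
        ring
    · have h0 : m = 0 := by omega
      subst h0
      rw [if_neg hpos, pvDigits_small (by omega)]
      have h1 : pvChProd [Nat.digitChar 0] = 1 := by decide
      rw [h1, mul_one]

-- ===== VERDICT (by name: the statement is the Claim_ definition above) =====
theorem get_multiplied_digits_spec : Claim_equal_get_multiplied_digits := by
  intro number _ hpre
  unfold Spec_get_multiplied_digits get_multiplied_digits get_multiplied_digits_alt
  have hpre' : 0 ≤ number := hpre
  have hlt : number.toNat < number.natAbs + 1 := by omega
  rw [pvAGo_eq _ _ hpre' hlt, pvBGo_eq _ _ _ hpre' hlt, one_mul]
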